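-- pv_equiv track=rewrite | github.com/FAIZANTKHAN/DSA_Python | DSA41_Count Number Of Substring with Exactly K Distinct Characters.py | atMostChar
-- ===== SOURCE A (Python) =====
-- def atMostChar(name, k):
--     # Get the length of the input string
--     n = len(name)
--
--     # Initialize start (s) and end (e) pointers for the sliding window
--     s, e = 0, 0
--
--     # Dictionary to keep track of character counts in the current window
--     dp = {}
--
--     # Variable to store the result
--     ans = 0
--
--     # Iterate over the string with the end pointer
--     while e < n:
--         # Get the current character at the end pointer
--         ch = name[e]
--
--         # Increment the count of the current character in the dictionary
--         dp[ch] = dp.get(ch, 0) + 1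
--
--         # If the number of distinct characters in the window is less than or equal to k
--         if len(dp) <= k:
--             # Add the number of substrings ending at 'e' and starting from 's' to 'ans'
--             ans = ans + e - s + 1
--             # Move the end pointer to the right
--             e += 1
--         else:
--             # If the number of distinct characters exceeds k
--             while s <= e and len(dp) > k:
--                 # Get the character at the start pointer
--                 start_char = name[s]
--
--                 # Decrement the count of the start character
--                 if dp[start_char] > 1:
--                     dp[start_char] -= 1
--                 else:
--                     # If the count becomes 0, remove the character from the dictionary
--                     del dp[start_char]
--
--                 # Move the start pointer to the right
--                 s += 1
--
--             # After adjusting the start pointer, add the number of valid substrings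
--             if s <= e and len(dp) <= k:
--                 ans = ans + e - s + 1
--
--             # Move the end pointer to the right
--             e += 1
--
--     # Return the total count of substrings with at most k distinct characters
--     return ans
-- ===== SOURCE B (Python) =====
-- def atMostChar(name, k):
--     n = len(name)
--     ans = 0
--     for s in range(n):
--         seen = {}
--         for e in range(s, n):
--             c = name[e]
--             seen[c] = seen.get(c, 0) + 1
--             if len(seen) <= k:
--                 ans += 1
--             else:
--                 break
--     return ans
-- ===== Notes on version B (the rewrite author's own statement) =====
-- stated objective: alternative
-- what changed: Replaced the amortized sliding-window pass (two moving pointers sharing one count dict) by a naive nested double loop that restarts a fresh count dict at every start index and breaks the inner scan when the window exceeds k distinct characters.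
import Mathlib
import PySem

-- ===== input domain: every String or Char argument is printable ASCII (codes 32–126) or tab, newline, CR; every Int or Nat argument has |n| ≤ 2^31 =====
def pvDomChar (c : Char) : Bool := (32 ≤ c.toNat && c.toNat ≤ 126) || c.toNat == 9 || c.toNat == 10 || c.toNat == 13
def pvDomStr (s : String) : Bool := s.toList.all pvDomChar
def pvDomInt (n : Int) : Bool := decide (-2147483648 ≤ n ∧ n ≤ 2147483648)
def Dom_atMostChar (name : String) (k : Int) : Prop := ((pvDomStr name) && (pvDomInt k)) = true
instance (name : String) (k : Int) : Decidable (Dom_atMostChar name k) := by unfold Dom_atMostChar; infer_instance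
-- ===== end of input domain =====

-- B replaces A's amortized sliding window (two pointers sharing one count dict) by a naive
-- nested double loop with a fresh dict per start index; objective: alternative (not faster).

-- ===== PORT A =====
-- inner 'while s <= e and len(dp) > k' shrink loop of A (state: s, dp)
def pvShrink (l : List Char) (k : Int) (e : Nat) (s : Nat) (dp : PySem.Dict Char Int) :
    Nat × PySem.Dict Char Int :=
  if h : s ≤ e ∧ k < (dp.size : Int) then
    -- name[s]; s < l.length here whenever the loop is reached with a window inside l
    let startChar := l.getD s ' '
    -- dp[start_char] is present in Python; getD reads the same value
    let dp' := if 1 < dp.getD startChar 0 then dp.insert startChar (dp.getD startChar 0 - 1)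
               else dp.erase startChar
    pvShrink l k e (s + 1) dp'
  else (s, dp)
termination_by e + 1 - s
decreasing_by omega

-- outer 'while e < n' loop of A (state: e, s, dp, ans)
def pvLoopA (l : List Char) (k : Int) (e s : Nat) (dp : PySem.Dict Char Int) (ans : Int) : Int :=
  if e < l.length then
    let ch := l.getD e ' '   -- name[e], in range
    let dp1 := dp.insert ch (dp.getD ch 0 + 1)
    if (dp1.size : Int) ≤ k then
      pvLoopA l k (e + 1) s dp1 (ans + (e : Int) - (s : Int) + 1)
    else
      let p := pvShrink l k e s dp1
      let ans1 := if p.1 ≤ e ∧ (p.2.size : Int) ≤ k then ans + (e : Int) - (p.1 : Int) + 1 else ans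
      pvLoopA l k (e + 1) p.1 p.2 ans1
  else ans
termination_by l.length - e

def atMostChar (name : String) (k : Int) : Int :=
  pvLoopA name.toList k 0 0 PySem.Dict.empty 0

-- ===== PORT B =====
-- inner 'for e in range(s, n)' loop of B with its break (state: e, seen, ans)
def pvInnerB (l : List Char) (k : Int) (e : Nat) (seen : PySem.Dict Char Int) (ans : Int) : Int :=
  if e < l.length then
    let c := l.getD e ' '   -- name[e], in range
    let seen1 := seen.insert c (seen.getD c 0 + 1)
    if (seen1.size : Int) ≤ k then pvInnerB l k (e + 1) seen1 (ans + 1) else ans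
  else ans
termination_by l.length - e

def atMostChar_alt (name : String) (k : Int) : Int :=
  let l := name.toList
  (List.range l.length).foldl (fun ans s => pvInnerB l k s PySem.Dict.empty ans) 0

-- ===== PRECONDITION & SPEC =====
def Spec_atMostChar (name : String) (k : Int) (out : Int) : Prop := out = atMostChar_alt name k
instance (name : String) (k : Int) (out : Int) : Decidable (Spec_atMostChar name k out) := by unfold Spec_atMostChar; infer_instance

-- ===== CLAIM (what is proved, stated in full; the proofs are below) =====
def Claim_equal_atMostChar : Prop := ∀ (name : String) (k : Int), Dom_atMostChar name k → Spec_atMostChar name k (atMostChar name k)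

-- ===== LEMMAS AND PROOFS =====

-- the window name[s:t] and its number of distinct characters
def pvWnd (l : List Char) (s t : Nat) : List Char := (l.take t).drop s
def pvDis (l : List Char) (s t : Nat) : Nat := (pvWnd l s t).toFinset.card
abbrev pvValid (l : List Char) (k : Int) (s t : Nat) : Prop := (pvDis l s t : Int) ≤ k

-- dp is exactly the character counter of window w
def pvRel (dp : PySem.Dict Char Int) (w : List Char) : Prop :=
  dp.keys.Nodup ∧ ∀ c, dp.get? c = if w.count c = 0 then none else some ((w.count c : Int))

lemma pvFind (c c' : Char) (hne : c' ≠ c) (L : List (Char × Int)) :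
    List.find? (fun p => p.1 == c') (L.filter (fun p => !(p.1 == c))) =
    List.find? (fun p => p.1 == c') L := by
  induction L with
  | nil => rfl
  | cons p L ih =>
    by_cases hpc : p.1 = c
    · simp [hpc, Ne.symm hne, ih]
    · by_cases hpc' : p.1 = c'
      · rw [List.filter_cons_of_pos (by simp [hpc]),
          List.find?_cons_of_pos (by simp [hpc']), List.find?_cons_of_pos (by simp [hpc'])]
      · simp [hpc, hpc', ih]

-- PySem.Dict has no erase lemmas in the book; these two are proved from its definition
lemma pvGet?_erase (d : PySem.Dict Char Int) (c c' : Char) :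
    (d.erase c).get? c' = if c' = c then none else d.get? c' := by
  simp only [PySem.Dict.get?, PySem.Dict.erase]
  by_cases hc : c' = c
  · subst hc
    rw [if_pos rfl]
    simp [List.find?_eq_none]
  · rw [if_neg hc, pvFind c c' hc]

lemma pvNodup_keys_erase (d : PySem.Dict Char Int) (c : Char) (h : d.keys.Nodup) :
    (d.erase c).keys.Nodup := by
  have hsub : (d.erase c).keys.Sublist d.keys := by
    simp only [PySem.Dict.keys, PySem.Dict.erase]
    exact List.Sublist.map _ List.filter_sublist
  exact hsub.nodup h

lemma pvRel_empty : pvRel PySem.Dict.empty [] := by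
  constructor
  · exact PySem.Dict.nodup_keys_empty
  · intro c; simp [PySem.Dict.get?_empty]

lemma pvRel_getD {dp w} (h : pvRel dp w) (c : Char) : dp.getD c 0 = (w.count c : Int) := by
  rw [PySem.Dict.getD_eq_get?_getD, h.2 c]
  by_cases hc : w.count c = 0 <;> simp [hc]

lemma pvRel_size {dp w} (h : pvRel dp w) : dp.size = w.toFinset.card := by
  have hk : dp.size = dp.keys.length := by simp [PySem.Dict.size, PySem.Dict.keys]
  rw [hk, ← List.toFinset_card_of_nodup h.1]
  congr 1
  ext c
  simp only [List.mem_toFinset]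
  rw [← not_iff_not, ← PySem.Dict.get?_eq_none_iff_not_mem_keys, h.2 c]
  constructor
  · intro hg
    by_cases hc : w.count c = 0
    · simpa [List.count_eq_zero] using hc
    · simp [hc] at hg
  · intro hm; simp [List.count_eq_zero.2 hm]

lemma pvRel_insert {dp w} (h : pvRel dp w) (c : Char) :
    pvRel (dp.insert c (dp.getD c 0 + 1)) (w ++ [c]) := by
  refine ⟨PySem.Dict.nodup_keys_insert _ _ _ h.1, fun c' => ?_⟩
  rw [PySem.Dict.get?_insert]
  by_cases hc : c' = c
  · subst hc
    have hcount : (w ++ [c']).count c' = w.count c' + 1 := by simp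
    simp [hcount, pvRel_getD h]
  · have hcount : (w ++ [c]).count c' = w.count c' := by
      simp [List.count_append, Ne.symm hc]
    simp only [if_neg hc, hcount, h.2 c']

lemma pvRel_pop {dp c w} (h : pvRel dp (c :: w)) :
    pvRel (if 1 < dp.getD c 0 then dp.insert c (dp.getD c 0 - 1) else dp.erase c) w := by
  have hg := pvRel_getD h
  have hself : (c :: w).count c = w.count c + 1 := by simp
  have hne : ∀ c', c' ≠ c → (c :: w).count c' = w.count c' := by
    intro c' hc; simp [List.count_cons_of_ne (Ne.symm hc)]
  by_cases hgt : 1 < dp.getD c 0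
  · rw [if_pos hgt]
    have hwc : 0 < w.count c := by
      have := hg c; rw [hself] at this; push_cast at this; omega
    refine ⟨PySem.Dict.nodup_keys_insert _ _ _ h.1, fun c' => ?_⟩
    rw [PySem.Dict.get?_insert]
    by_cases hc : c' = c
    · subst hc
      rw [if_pos rfl, hg c', hself, if_neg (by omega)]
      push_cast
      ring_nf
    · rw [if_neg hc, h.2 c', hne c' hc]
  · rw [if_neg hgt]
    have hwc : w.count c = 0 := by
      have := hg c; rw [hself] at this; push_cast at this; omega
    refine ⟨pvNodup_keys_erase _ _ h.1, fun c' => ?_⟩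
    rw [pvGet?_erase]
    by_cases hc : c' = c
    · subst hc; simp [hwc]
    · rw [if_neg hc, h.2 c', hne c' hc]

-- window facts
lemma pvWnd_nil (l : List Char) (s : Nat) : pvWnd l s s = [] := by
  simp [pvWnd]

lemma pvWnd_snoc {l : List Char} {s t : Nat} (hs : s ≤ t) (ht : t < l.length) :
    pvWnd l s (t + 1) = pvWnd l s t ++ [l.getD t ' '] := by
  unfold pvWnd
  rw [List.take_add_one, List.drop_append_of_le_length (by simp; omega)]
  congr 1
  simp [List.getElem?_eq_getElem ht, List.getD]

lemma pvWnd_cons {l : List Char} {s t : Nat} (hs : s < t) (ht : t ≤ l.length) :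
    pvWnd l s t = l.getD s ' ' :: pvWnd l (s + 1) t := by
  unfold pvWnd
  have hlen : s < (l.take t).length := by simp; omega
  rw [List.drop_eq_getElem_cons hlen]
  congr 1
  rw [List.getElem_take]
  simp [List.getD, List.getElem?_eq_getElem (by omega : s < l.length)]

-- monotonicity of the distinct count
lemma pvDis_mono_left {l : List Char} {s s' t : Nat} (h : s ≤ s') : pvDis l s' t ≤ pvDis l s t := by
  unfold pvDis pvWnd
  apply Finset.card_le_card
  intro c hc
  simp only [List.mem_toFinset] at *
  have hd : (l.take t).drop s' = ((l.take t).drop s).drop (s' - s) := by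
    rw [List.drop_drop]; congr 1; omega
  rw [hd] at hc
  exact List.mem_of_mem_drop hc

lemma pvDis_mono_right {l : List Char} {s t t' : Nat} (h : t ≤ t') : pvDis l s t ≤ pvDis l s t' := by
  unfold pvDis pvWnd
  apply Finset.card_le_card
  intro c hc
  simp only [List.mem_toFinset] at *
  rw [List.drop_take] at hc ⊢
  have he : (l.drop s).take (t - s) = ((l.drop s).take (t' - s)).take (t - s) := by
    rw [List.take_take, min_eq_left (by omega)]
  rw [he] at hc
  exact List.take_subset _ _ hc

-- counting: contributions of one end index / one start index
def pvRowCnt (l : List Char) (k : Int) (t : Nat) : Nat :=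
  ((Finset.range t).filter (fun s => (pvDis l s t : Int) ≤ k)).card

def pvColCnt (l : List Char) (k : Int) (s : Nat) : Nat :=
  ((Finset.Ico s l.length).filter (fun t => (pvDis l s (t + 1) : Int) ≤ k)).card

lemma pvRow_of_none {l k t} (hmin : ∀ s' < t, ¬ pvValid l k s' t) : pvRowCnt l k t = 0 := by
  unfold pvRowCnt
  rw [Finset.card_eq_zero, Finset.filter_eq_empty_iff]
  intro s hs
  exact hmin s (Finset.mem_range.1 hs)

lemma pvRow_of_valid {l k s e} (hv : pvValid l k s (e + 1))
    (hmin : ∀ s' < s, ¬ pvValid l k s' (e + 1)) : pvRowCnt l k (e + 1) = e + 1 - s := by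
  unfold pvRowCnt
  have hset : (Finset.range (e + 1)).filter (fun s' => (pvDis l s' (e + 1) : Int) ≤ k) =
      Finset.Ico s (e + 1) := by
    ext s'
    simp only [Finset.mem_filter, Finset.mem_range, Finset.mem_Ico]
    constructor
    · rintro ⟨h1, h2⟩
      refine ⟨?_, h1⟩
      by_contra hlt
      exact hmin s' (by omega) h2
    · rintro ⟨h1, h2⟩
      exact ⟨h2, le_trans (by exact_mod_cast pvDis_mono_left h1) hv⟩
  rw [hset, Nat.card_Ico]

-- the shrink loop: keeps the counter in sync, advances the start pointer minimally
lemma pvShrink_go (l : List Char) (k : Int) (e : Nat) :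
    ∀ d s dp, e + 1 - s ≤ d → s ≤ e + 1 → e + 1 ≤ l.length → pvRel dp (pvWnd l s (e + 1)) →
    (∀ s' < s, ¬ pvValid l k s' (e + 1)) →
    s ≤ (pvShrink l k e s dp).1 ∧ (pvShrink l k e s dp).1 ≤ e + 1 ∧
      pvRel (pvShrink l k e s dp).2 (pvWnd l (pvShrink l k e s dp).1 (e + 1)) ∧
      (∀ s' < (pvShrink l k e s dp).1, ¬ pvValid l k s' (e + 1)) ∧
      (e < (pvShrink l k e s dp).1 ∨ pvValid l k (pvShrink l k e s dp).1 (e + 1)) := by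
  intro d
  induction d with
  | zero =>
    intro s dp hd hse hlen hrel hmin
    have hs : s = e + 1 := by omega
    rw [pvShrink, dif_neg (by omega)]
    subst hs
    refine ⟨le_refl _, le_refl _, hrel, hmin, by omega⟩
  | succ d ih =>
    intro s dp hd hse hlen hrel hmin
    have hsize : (dp.size : Int) = (pvDis l s (e + 1) : Int) := by
      rw [pvRel_size hrel]; rfl
    by_cases h : s ≤ e ∧ k < (dp.size : Int)
    · rw [pvShrink, dif_pos h]
      have hwc := pvWnd_cons (show s < e + 1 by omega) hlen
      have hrel' := pvRel_pop (c := l.getD s ' ') (w := pvWnd l (s + 1) (e + 1)) (by rwa [← hwc])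
      have hmin' : ∀ s' < s + 1, ¬ pvValid l k s' (e + 1) := by
        intro s' hs'
        by_cases hss : s' = s
        · subst hss; unfold pvValid; omega
        · exact hmin s' (by omega)
      have := ih (s + 1) _ (by omega) (by omega) hlen hrel' hmin'
      exact ⟨le_trans (Nat.le_succ s) this.1, this.2.1, this.2.2.1, this.2.2.2.1, this.2.2.2.2⟩
    · rw [pvShrink, dif_neg h]
      refine ⟨le_refl _, hse, hrel, hmin, ?_⟩
      rcases not_and_or.1 h with h1 | h2
      · left; show e < s; omega
      · right; show (pvDis l s (e + 1) : Int) ≤ k; omega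

-- the outer loop of A adds, for each end index, the number of valid start indices
lemma pvLoopA_go (l : List Char) (k : Int) :
    ∀ d e s dp ans, l.length - e ≤ d → s ≤ e → e ≤ l.length → pvRel dp (pvWnd l s e) →
    (∀ s' < s, ¬ pvValid l k s' e) →
    pvLoopA l k e s dp ans = ans + ∑ t ∈ Finset.Ico e l.length, (pvRowCnt l k (t + 1) : Int) := by
  intro d
  induction d with
  | zero =>
    intro e s dp ans hd hse hlen hrel hmin
    have he : e = l.length := by omega
    rw [pvLoopA, if_neg (by omega)]
    subst he
    simp
  | succ d ih =>
    intro e s dp ans hd hse hlen hrel hmin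
    by_cases hlt : e < l.length
    · rw [pvLoopA, if_pos hlt]
      have hrel1 : pvRel (dp.insert (l.getD e ' ') (dp.getD (l.getD e ' ') 0 + 1))
          (pvWnd l s (e + 1)) := by
        rw [pvWnd_snoc hse hlt]
        exact pvRel_insert hrel (l.getD e ' ')
      set dp1 := dp.insert (l.getD e ' ') (dp.getD (l.getD e ' ') 0 + 1) with hdp1
      have hsize1 : (dp1.size : Int) = (pvDis l s (e + 1) : Int) := by
        rw [pvRel_size hrel1]; rfl
      have hmin1 : ∀ s' < s, ¬ pvValid l k s' (e + 1) := by
        intro s' hs' hv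
        exact hmin s' hs' (le_trans (by exact_mod_cast pvDis_mono_right (Nat.le_succ e)) hv)
      have hsplit : ∑ t ∈ Finset.Ico e l.length, (pvRowCnt l k (t + 1) : Int) =
          (pvRowCnt l k (e + 1) : Int) + ∑ t ∈ Finset.Ico (e + 1) l.length, (pvRowCnt l k (t + 1) : Int) :=
        Finset.sum_eq_sum_Ico_succ_bot hlt _
      by_cases hk : (dp1.size : Int) ≤ k
      · rw [if_pos hk]
        have hv : pvValid l k s (e + 1) := by unfold pvValid; omega
        have hrow : pvRowCnt l k (e + 1) = e + 1 - s := pvRow_of_valid hv hmin1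
        rw [ih (e + 1) s dp1 _ (by omega) (by omega) (by omega) hrel1 hmin1]
        rw [hsplit, hrow]
        have hcast : ((e + 1 - s : Nat) : Int) = (e : Int) - s + 1 := by omega
        rw [hcast]; ring
      · rw [if_neg hk]
        have hsh := pvShrink_go l k e (e + 1 - s) s dp1 (by omega) (by omega) (by omega) hrel1 hmin1
        set p := pvShrink l k e s dp1 with hp
        obtain ⟨h1, h2, h3, h4, h5⟩ := hsh
        have hsizep : (p.2.size : Int) = (pvDis l p.1 (e + 1) : Int) := by
          rw [pvRel_size h3]; rfl
        rw [ih (e + 1) p.1 p.2 _ (by omega) h2 (by omega) h3 h4]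
        by_cases hc : p.1 ≤ e ∧ (p.2.size : Int) ≤ k
        · rw [if_pos hc]
          have hv : pvValid l k p.1 (e + 1) := by unfold pvValid; omega
          have hrow : pvRowCnt l k (e + 1) = e + 1 - p.1 := pvRow_of_valid hv h4
          rw [hsplit, hrow]
          have hcast : ((e + 1 - p.1 : Nat) : Int) = (e : Int) - p.1 + 1 := by omega
          rw [hcast]; ring
        · rw [if_neg hc]
          have hpe : p.1 = e + 1 := by
            rcases h5 with h5 | h5
            · omega
            · rcases not_and_or.1 hc with h | h
              · omega
              · exact absurd h5 (by omega)
          have hrow : pvRowCnt l k (e + 1) = 0 := by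
            apply pvRow_of_none
            intro s' hs'
            exact h4 s' (by omega)
          rw [hsplit, hrow]
          ring
    · rw [pvLoopA, if_neg hlt]
      have he : e = l.length := by omega
      subst he
      simp

-- the inner loop of B counts the valid end indices for one start index
lemma pvInnerB_go (l : List Char) (k : Int) (s : Nat) :
    ∀ d e seen ans, l.length - e ≤ d → s ≤ e → pvRel seen (pvWnd l s e) →
    pvInnerB l k e seen ans =
      ans + (((Finset.Ico e l.length).filter (fun t => (pvDis l s (t + 1) : Int) ≤ k)).card : Int) := by
  intro d
  induction d with
  | zero =>
    intro e seen ans hd hse hrel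
    rw [pvInnerB, if_neg (by omega)]
    rw [Finset.Ico_eq_empty (by omega)]
    simp
  | succ d ih =>
    intro e seen ans hd hse hrel
    by_cases hlt : e < l.length
    · rw [pvInnerB, if_pos hlt]
      have hrel1 : pvRel (seen.insert (l.getD e ' ') (seen.getD (l.getD e ' ') 0 + 1))
          (pvWnd l s (e + 1)) := by
        rw [pvWnd_snoc hse hlt]
        exact pvRel_insert hrel (l.getD e ' ')
      set seen1 := seen.insert (l.getD e ' ') (seen.getD (l.getD e ' ') 0 + 1) with hs1
      have hsize : (seen1.size : Int) = (pvDis l s (e + 1) : Int) := by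
        rw [pvRel_size hrel1]; rfl
      have hsplit : ((Finset.Ico e l.length).filter (fun t => (pvDis l s (t + 1) : Int) ≤ k)).card =
          (if (pvDis l s (e + 1) : Int) ≤ k then 1 else 0) +
          ((Finset.Ico (e + 1) l.length).filter (fun t => (pvDis l s (t + 1) : Int) ≤ k)).card := by
        rw [Finset.card_filter, Finset.card_filter, Finset.sum_eq_sum_Ico_succ_bot hlt]
      by_cases hk : (seen1.size : Int) ≤ k
      · rw [if_pos hk]
        rw [ih (e + 1) seen1 (ans + 1) (by omega) (by omega) hrel1]
        rw [hsplit, if_pos (by omega)]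
        push_cast
        ring
      · rw [if_neg hk]
        have hnone : ((Finset.Ico (e + 1) l.length).filter
            (fun t => (pvDis l s (t + 1) : Int) ≤ k)).card = 0 := by
          rw [Finset.card_eq_zero, Finset.filter_eq_empty_iff]
          intro t ht hv
          have hm : pvDis l s (e + 1) ≤ pvDis l s (t + 1) := by
            apply pvDis_mono_right
            have := (Finset.mem_Ico.1 ht).1
            omega
          omega
        rw [hsplit, if_neg (by omega), hnone]
        simp
    · rw [pvInnerB, if_neg hlt]
      rw [Finset.Ico_eq_empty (by omega)]
      simp

-- double counting: summing valid pairs by end index equals summing them by start index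
lemma pvSum_rows_eq_cols (l : List Char) (k : Int) :
    ∑ t ∈ Finset.range l.length, pvRowCnt l k (t + 1) =
    ∑ s ∈ Finset.range l.length, pvColCnt l k s := by
  have hrow : ∀ t ∈ Finset.range l.length, pvRowCnt l k (t + 1) =
      ∑ s ∈ Finset.range l.length, (if s ≤ t ∧ (pvDis l s (t + 1) : Int) ≤ k then 1 else 0) := by
    intro t ht
    rw [Finset.mem_range] at ht
    unfold pvRowCnt
    rw [Finset.card_filter]
    rw [← Finset.sum_subset (by intro x hx; rw [Finset.mem_range] at *; omega :
      Finset.range (t + 1) ⊆ Finset.range l.length)]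
    · apply Finset.sum_congr rfl
      intro s hs
      rw [Finset.mem_range] at hs
      congr 1
      simp [Nat.lt_succ_iff.1 hs]
    · intro s hs hns
      rw [Finset.mem_range] at hs
      rw [Finset.mem_range] at hns
      rw [if_neg (by omega)]
  have hcol : ∀ s ∈ Finset.range l.length, pvColCnt l k s =
      ∑ t ∈ Finset.range l.length, (if s ≤ t ∧ (pvDis l s (t + 1) : Int) ≤ k then 1 else 0) := by
    intro s hs
    unfold pvColCnt
    rw [Finset.card_filter]
    have hico : Finset.Ico s l.length = (Finset.range l.length).filter (fun t => s ≤ t) := by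
      ext t
      simp [Finset.mem_Ico, Finset.mem_filter, Finset.mem_range, and_comm]
    rw [hico, Finset.sum_filter]
    apply Finset.sum_congr rfl
    intro t ht
    by_cases hst : s ≤ t
    · simp [hst]
    · simp [hst]
  rw [Finset.sum_congr rfl hrow, Finset.sum_congr rfl hcol]
  exact Finset.sum_comm

lemma pvAlt_eq (name : String) (k : Int) :
    atMostChar_alt name k = ∑ s ∈ Finset.range name.toList.length, (pvColCnt name.toList k s : Int) := by
  unfold atMostChar_alt
  set l := name.toList
  have hstep : ∀ s ans, pvInnerB l k s PySem.Dict.empty ans = ans + (pvColCnt l k s : Int) := by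
    intro s ans
    rw [pvInnerB_go l k s (l.length - s) s PySem.Dict.empty ans (by omega) (le_refl s)
      (by rw [pvWnd_nil]; exact pvRel_empty)]
    rfl
  have hfold : ∀ n ans, (List.range n).foldl (fun ans s => pvInnerB l k s PySem.Dict.empty ans) ans =
      ans + ∑ s ∈ Finset.range n, (pvColCnt l k s : Int) := by
    intro n
    induction n with
    | zero => intro ans; simp
    | succ n ihn =>
      intro ans
      rw [List.range_succ, List.foldl_append, ihn, Finset.sum_range_succ]
      simp only [List.foldl_cons, List.foldl_nil, hstep]
      ring
  rw [hfold]
  simp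

lemma pvA_eq (name : String) (k : Int) :
    atMostChar name k = ∑ t ∈ Finset.range name.toList.length, (pvRowCnt name.toList k (t + 1) : Int) := by
  unfold atMostChar
  set l := name.toList
  rw [pvLoopA_go l k l.length 0 0 PySem.Dict.empty 0 (by omega) (le_refl 0) (by omega)
    (by rw [pvWnd_nil]; exact pvRel_empty) (by omega)]
  rw [← Finset.range_eq_Ico]
  ring

-- ===== VERDICT (by name: the statement is the Claim_ definition above) =====
theorem atMostChar_spec : Claim_equal_atMostChar := by
  intro name k _
  show atMostChar name k = atMostChar_alt name k
  rw [pvA_eq, pvAlt_eq, ← Nat.cast_sum, ← Nat.cast_sum, pvSum_rows_eq_cols]
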